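-- pv_equiv track=rewrite | github.com/linhdvu14/cp-sols | sols/CodeForces/1864_d12_harbourspace/E_Guess_Game.py | f
-- ===== SOURCE A (Python) =====
-- BITS = 30
--
-- def f(a, b):
--     pos = [p for p in range(BITS - 1, -1, -1) if ((a | b) >> p) & 1]
--     if not pos: return 1
--     if (a >> pos[0]) & 1 == 0: return 1
--
--     res = 1
--     for i, p in enumerate(pos):
--         res += 1
--         if (b >> p) & 1 == 0: break
--         if i + 1 == len(pos) or (b >> pos[i + 1]) & 1 == 0: break
--         a, b = b, a
--
--     return res
-- ===== SOURCE B (Python) =====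
-- BITS = 30
--
-- def f(a, b):
--     pos = [p for p in range(BITS - 1, -1, -1) if ((a | b) >> p) & 1]
--     k = 0
--     while k < len(pos) and ((a >> pos[k]) & 1) and ((b >> pos[k]) & 1):
--         k += 1
--     if k == len(pos):
--         return k + 1
--     chk = b if k % 2 == 0 else a
--     return k + (1 if (chk >> pos[k]) & 1 else 2)
-- ===== Notes on version B (the rewrite author's own statement) =====
-- stated objective: alternative
-- what changed: A simulates the game with a swap-and-break loop over the descending set-bit positions of a|b (plus a separate top-bit early return); B instead counts the longest prefix of positions whose bit is set in both a and b and reads the answer directly off that count k: k+1 if the prefix is everything, otherwise k+1 or k+2 depending on whether the player checked at parity k owns the first divergent bit.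
import Mathlib
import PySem

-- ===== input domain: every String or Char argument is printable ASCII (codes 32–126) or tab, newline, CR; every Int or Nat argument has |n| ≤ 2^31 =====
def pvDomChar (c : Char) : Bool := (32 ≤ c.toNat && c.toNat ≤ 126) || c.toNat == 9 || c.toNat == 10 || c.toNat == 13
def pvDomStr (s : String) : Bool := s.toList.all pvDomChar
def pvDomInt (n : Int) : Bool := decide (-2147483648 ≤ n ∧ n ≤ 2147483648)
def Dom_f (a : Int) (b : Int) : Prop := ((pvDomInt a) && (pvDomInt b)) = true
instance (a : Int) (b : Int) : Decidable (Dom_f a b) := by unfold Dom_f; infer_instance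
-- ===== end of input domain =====

-- B replaces A's swap-and-break loop by counting the common prefix of shared set bits
-- and reading the answer off a closed formula (objective: alternative; same cost).

-- ===== PORT A =====

-- pos = [p for p in range(BITS - 1, -1, -1) if ((a | b) >> p) & 1]
-- (every p in the range is in 0..29, so p.toNat is exact for the shift amount)
def fPos (a b : Int) : List Int :=
  (PySem.List.pyRange (30 - 1) (-1) (-1)).filter
    (fun p => decide (PySem.Int.band ((PySem.Int.bor a b) >>> p.toNat) 1 ≠ 0))

-- the for-loop over `pos`: returns the total added to res; 'i + 1 == len(pos)'
-- is 'rest = []' and 'pos[i + 1]' is the head of rest; 'a, b = b, a' is the swap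
def fLoop (a b : Int) : List Int → Int
  | [] => 0
  | p :: rest =>
    1 + (if PySem.Int.band (b >>> p.toNat) 1 = 0 then 0
         else match rest with
           | [] => 0
           | q :: _ => if PySem.Int.band (b >>> q.toNat) 1 = 0 then 0 else fLoop b a rest)

def f (a : Int) (b : Int) : Int :=
  match fPos a b with
  | [] => 1
  | p0 :: _ =>
    if PySem.Int.band (a >>> p0.toNat) 1 = 0 then 1
    else 1 + fLoop a b (fPos a b)

-- ===== PORT B =====

-- pos = [p for p in range(BITS - 1, -1, -1) if ((a | b) >> p) & 1]  (same comprehension as Source B)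
def gPos (a b : Int) : List Int :=
  (PySem.List.pyRange (30 - 1) (-1) (-1)).filter
    (fun p => decide (PySem.Int.band ((PySem.Int.bor a b) >>> p.toNat) 1 ≠ 0))

-- the while loop: k advances while both players own the current bit
def fScan (a b : Int) : List Int → Int
  | [] => 0
  | p :: rest =>
    if PySem.Int.band (a >>> p.toNat) 1 ≠ 0 ∧ PySem.Int.band (b >>> p.toNat) 1 ≠ 0
    then 1 + fScan a b rest else 0

def f_alt (a : Int) (b : Int) : Int :=
  let pos := gPos a b
  let k := fScan a b pos
  if k = (pos.length : Int) then k + 1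
  else
    let chk := if PySem.Int.mod k 2 = 0 then b else a
    match PySem.List.pyGet? pos k with
    | some p => k + (if PySem.Int.band (chk >>> p.toNat) 1 ≠ 0 then 1 else 2)
    | none => 0   -- unreachable: 0 ≤ k < len(pos) in this branch

-- ===== PRECONDITION & SPEC =====
def Spec_f (a : Int) (b : Int) (out : Int) : Prop := out = f_alt a b
instance (a : Int) (b : Int) (out : Int) : Decidable (Spec_f a b out) := by unfold Spec_f; infer_instance

-- ===== CLAIM (what is proved, stated in full; the proofs are below) =====
def Claim_equal_f : Prop := ∀ (a : Int) (b : Int), Dom_f a b → Spec_f a b (f a b)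

-- ===== LEMMAS AND PROOFS =====

-- ---- arithmetic facts about Python's bitwise primitives ----

theorem natSubAndEqXor : ∀ n m : Nat, n - (n &&& m) = n ^^^ (n &&& m) := by
  intro n
  induction n using Nat.strong_induction_on with
  | _ n ih =>
    intro m
    rcases Nat.eq_zero_or_pos n with h0 | hpos
    · simp [h0]
    · have ih2 := ih (n / 2) (Nat.div_lt_self hpos (by norm_num)) (m / 2)
      have hand : (n &&& m) / 2 = n / 2 &&& m / 2 := Nat.and_div_two
      have hxor : (n ^^^ (n &&& m)) / 2 = n / 2 ^^^ (n &&& m) / 2 := Nat.xor_div_two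
      rw [hand] at hxor
      have handm : (n &&& m) % 2 = 1 ↔ n % 2 = 1 ∧ m % 2 = 1 := Nat.and_mod_two_eq_one
      have hxorm := @Nat.xor_mod_two_eq_one n (n &&& m)
      have hle2 : n / 2 &&& m / 2 ≤ n / 2 := Nat.and_le_left
      omega

theorem testBitSubAnd (n m k : Nat) :
    (n - (n &&& m)).testBit k = (n.testBit k && !(m.testBit k)) := by
  rw [natSubAndEqXor]
  rw [Nat.testBit_xor, Nat.testBit_and]
  cases n.testBit k <;> cases m.testBit k <;> rfl

theorem negCastSubOne (t : Nat) : -(t:Int) - 1 = Int.negSucc t := by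
  rw [Int.negSucc_eq]; ring

theorem testBitBor (x y : Int) (k : Nat) :
    (PySem.Int.bor x y).testBit k = (x.testBit k || y.testBit k) := by
  unfold PySem.Int.bor
  rcases x with m | m <;> rcases y with n | n <;>
    simp [Int.testBit, Int.negSucc_eq]
  · rw [if_neg (by omega : ¬((n:Int) ≤ -1)), negCastSubOne]
    simp only [testBitSubAnd]
    cases m.testBit k <;> cases n.testBit k <;> rfl
  · rw [if_neg (by omega : ¬((m:Int) ≤ -1)), negCastSubOne]
    show (!(m - (m &&& n)).testBit k) = _
    rw [testBitSubAnd]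
    cases m.testBit k <;> cases n.testBit k <;> rfl
  · rw [if_neg (by omega : ¬((m:Int) ≤ -1)), if_neg (by omega : ¬((n:Int) ≤ -1)), negCastSubOne]
    simp only [Nat.testBit_and]
    cases m.testBit k <;> cases n.testBit k <;> rfl

theorem shiftOfNat (m : Nat) (k : Nat) : (Int.ofNat m) >>> k = Int.ofNat (m >>> k) := rfl
theorem shiftNegSucc (m : Nat) (k : Nat) : (Int.negSucc m) >>> k = Int.negSucc (m >>> k) := rfl
theorem negNegSuccSub (t : Nat) : -(Int.negSucc t) - 1 = (t : Int) := by
  rw [Int.negSucc_eq]; ring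

theorem bandOneShift (x : Int) (k : Nat) :
    (PySem.Int.band (x >>> k) 1 ≠ 0) ↔ x.testBit k = true := by
  rcases x with m | m
  · rw [shiftOfNat]
    unfold PySem.Int.band
    rw [if_pos (show (0:Int) ≤ Int.ofNat (m >>> k) from Int.natCast_nonneg _),
      if_pos (show (0:Int) ≤ 1 by norm_num)]
    have h1 : (Int.ofNat (m >>> k)).toNat = m >>> k := rfl
    have h2 : (1 : Int).toNat = 1 := rfl
    rw [h1, h2, Nat.and_one_is_mod]
    simp only [Int.testBit]
    rw [Nat.testBit_eq_decide_div_mod_eq, ← Nat.shiftRight_eq_div_pow]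
    simp only [ne_eq, Int.natCast_eq_zero, decide_eq_true_eq]
    omega
  · rw [shiftNegSucc]
    unfold PySem.Int.band
    rw [if_neg (show ¬ (0:Int) ≤ Int.negSucc (m >>> k) from Int.not_le.mpr (Int.negSucc_lt_zero _)),
      if_pos (show (0:Int) ≤ 1 by norm_num)]
    rw [negNegSuccSub]
    have h2 : (1 : Int).toNat = 1 := rfl
    have h3 : ((m >>> k : Nat) : Int).toNat = m >>> k := rfl
    rw [h2, h3, Nat.one_and_eq_mod_two]
    simp only [Int.testBit]
    rw [Nat.testBit_eq_decide_div_mod_eq, ← Nat.shiftRight_eq_div_pow]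
    simp only [ne_eq, Int.natCast_eq_zero, Bool.not_eq_eq_eq_not, Bool.not_true,
      decide_eq_false_iff_not]
    omega

-- every position selected by the comprehension is a set bit of a or of b
theorem memPosDisj (a b p : Int) (hp : p ∈ fPos a b) :
    PySem.Int.band (a >>> p.toNat) 1 ≠ 0 ∨ PySem.Int.band (b >>> p.toNat) 1 ≠ 0 := by
  rcases List.mem_filter.mp hp with ⟨-, hcond⟩
  have h : PySem.Int.band ((PySem.Int.bor a b) >>> p.toNat) 1 ≠ 0 := by simpa using hcond
  rw [bandOneShift, testBitBor] at h
  rcases Bool.or_eq_true_iff.mp h with h1 | h1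
  · exact Or.inl ((bandOneShift a p.toNat).mpr h1)
  · exact Or.inr ((bandOneShift b p.toNat).mpr h1)

-- ---- facts about B's scan ----

theorem fScanComm (l : List Int) : ∀ a b : Int, fScan a b l = fScan b a l := by
  induction l with
  | nil => intro a b; rfl
  | cons p rest ih => intro a b; simp [fScan, and_comm, ih a b]

theorem fScanNat (a b : Int) (l : List Int) :
    ∃ kn : Nat, fScan a b l = (kn : Int) ∧ kn ≤ l.length := by
  induction l with
  | nil => exact ⟨0, rfl, by simp⟩
  | cons p rest ih =>
    rcases ih with ⟨kn, hk, hle⟩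
    by_cases hc : PySem.Int.band (a >>> p.toNat) 1 ≠ 0 ∧ PySem.Int.band (b >>> p.toNat) 1 ≠ 0
    · refine ⟨kn + 1, ?_, by simp only [List.length_cons]; omega⟩
      simp only [fScan, if_pos hc, hk]
      push_cast; ring
    · exact ⟨0, by simp [fScan, hc], by simp⟩

-- ---- the two bodies as functions of the position list ----

def Abody (a b : Int) : List Int → Int
  | [] => 1
  | p0 :: rest =>
    if PySem.Int.band (a >>> p0.toNat) 1 = 0 then 1
    else 1 + fLoop a b (p0 :: rest)

def Bbody (a b : Int) (l : List Int) : Int :=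
  if fScan a b l = (l.length : Int) then fScan a b l + 1
  else
    ((PySem.List.pyGet? l (fScan a b l)).map (fun (p : Int) =>
      fScan a b l +
        (if PySem.Int.band ((if PySem.Int.mod (fScan a b l) 2 = 0 then b else a) >>> p.toNat) 1 ≠ 0
         then 1 else 2))).getD 0

theorem fEqAbody (a b : Int) : f a b = Abody a b (fPos a b) := by
  unfold f
  cases h : fPos a b with
  | nil => rfl
  | cons p0 rest => rfl

theorem fAltEqBbody (a b : Int) : f_alt a b = Bbody a b (fPos a b) := by
  have hg : gPos a b = fPos a b := rfl
  simp only [f_alt, Bbody, hg]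
  by_cases hc : fScan a b (fPos a b) = ((fPos a b).length : Int)
  · rw [if_pos hc, if_pos hc]
  · rw [if_neg hc, if_neg hc]
    cases h : PySem.List.pyGet? (fPos a b) (fScan a b (fPos a b)) with
    | none => rfl
    | some v => rfl

theorem pymodTwoCast (kn : Nat) : PySem.Int.mod ((kn : Nat) : Int) 2 = ((kn % 2 : Nat) : Int) := by
  simp [PySem.Int.mod, Int.fmod_eq_emod]

-- when both players own bit p, one round of A is one loop iteration with swapped roles
theorem Astep (a b p : Int) (rest : List Int)
    (hA : PySem.Int.band (a >>> p.toNat) 1 ≠ 0)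
    (hB : PySem.Int.band (b >>> p.toNat) 1 ≠ 0) :
    Abody a b (p :: rest) = 1 + Abody b a rest := by
  cases rest with
  | nil => simp [Abody, fLoop, hA, hB]
  | cons q rest' =>
    by_cases hq : PySem.Int.band (b >>> q.toNat) 1 = 0
    · simp [Abody, fLoop, hA, hB, hq]
    · simp [Abody, fLoop, hA, hB, hq]

-- when both players own bit p, B's scan advances and parity/index shift by one
theorem Bstep (a b p : Int) (rest : List Int)
    (hA : PySem.Int.band (a >>> p.toNat) 1 ≠ 0)
    (hB : PySem.Int.band (b >>> p.toNat) 1 ≠ 0) :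
    Bbody a b (p :: rest) = 1 + Bbody b a rest := by
  obtain ⟨kn, hk, hle⟩ := fScanNat b a rest
  have hsc : fScan a b (p :: rest) = ((kn + 1 : Nat) : Int) := by
    simp only [fScan, if_pos (And.intro hA hB), fScanComm rest a b, hk]
    push_cast; ring
  unfold Bbody
  rw [hsc, hk]
  by_cases hlen : kn = rest.length
  · rw [if_pos (show ((kn + 1 : Nat) : Int) = (((p :: rest).length : Nat) : Int) by
        simp only [List.length_cons]; push_cast; omega),
      if_pos (show ((kn : Nat) : Int) = ((rest.length : Nat) : Int) by omega)]
    push_cast; ring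
  · have hlt : kn < rest.length := lt_of_le_of_ne hle hlen
    rw [if_neg (show ¬ ((kn + 1 : Nat) : Int) = (((p :: rest).length : Nat) : Int) by
        simp only [List.length_cons]; push_cast; omega),
      if_neg (show ¬ ((kn : Nat) : Int) = ((rest.length : Nat) : Int) by omega)]
    rw [PySem.List.pyGet?_natCast, PySem.List.pyGet?_natCast]
    have hidx : (p :: rest)[kn + 1]? = rest[kn]? := by simp
    rw [hidx, List.getElem?_eq_getElem hlt]
    have hchk : (if PySem.Int.mod ((kn + 1 : Nat) : Int) 2 = 0 then b else a)
        = (if PySem.Int.mod ((kn : Nat) : Int) 2 = 0 then a else b) := by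
      rw [pymodTwoCast, pymodTwoCast]
      rcases Nat.mod_two_eq_zero_or_one kn with h | h
      · rw [h, (show (kn + 1) % 2 = 1 by omega)]; norm_num
      · rw [h, (show (kn + 1) % 2 = 0 by omega)]; norm_num
    rw [hchk]
    simp only [Option.map_some, Option.getD_some]
    push_cast; ring

theorem mainLemma : ∀ (l : List Int) (a b : Int),
    (∀ p ∈ l, PySem.Int.band (a >>> p.toNat) 1 ≠ 0 ∨ PySem.Int.band (b >>> p.toNat) 1 ≠ 0) →
    Abody a b l = Bbody a b l := by
  intro l
  induction l with
  | nil => intro a b _; rfl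
  | cons p rest ih =>
    intro a b h
    by_cases hA : PySem.Int.band (a >>> p.toNat) 1 = 0
    · have hB : PySem.Int.band (b >>> p.toNat) 1 ≠ 0 :=
        (h p (List.mem_cons_self)).resolve_left (by simpa using hA)
      have hsc : fScan a b (p :: rest) = ((0 : Nat) : Int) := by simp [fScan, hA]
      rw [show Abody a b (p :: rest) = 1 by simp [Abody, hA]]
      unfold Bbody
      rw [hsc]
      rw [if_neg (show ¬ ((0 : Nat) : Int) = (((p :: rest).length : Nat) : Int) by
        simp only [List.length_cons]; push_cast; omega)]
      rw [show PySem.List.pyGet? (p :: rest) ((0 : Nat) : Int) = some p by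
        rw [PySem.List.pyGet?_natCast]; rfl]
      rw [pymodTwoCast]
      simp only [Option.map_some, Option.getD_some]
      rw [if_pos (show (((0:Nat) % 2 : Nat) : Int) = 0 from rfl), if_pos hB]
      norm_num
    · by_cases hB : PySem.Int.band (b >>> p.toNat) 1 = 0
      · have hsc : fScan a b (p :: rest) = ((0 : Nat) : Int) := by simp [fScan, hB]
        have hAval : Abody a b (p :: rest) = 2 := by
          cases rest with
          | nil => simp [Abody, fLoop, hA, hB]
          | cons q rest' => simp [Abody, fLoop, hA, hB]
        rw [hAval]
        unfold Bbody
        rw [hsc]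
        rw [if_neg (show ¬ ((0 : Nat) : Int) = (((p :: rest).length : Nat) : Int) by
          simp only [List.length_cons]; push_cast; omega)]
        rw [show PySem.List.pyGet? (p :: rest) ((0 : Nat) : Int) = some p by
          rw [PySem.List.pyGet?_natCast]; rfl]
        rw [pymodTwoCast]
        simp only [Option.map_some, Option.getD_some]
        rw [if_pos (show (((0:Nat) % 2 : Nat) : Int) = 0 from rfl), if_neg (not_not_intro hB)]
        norm_num
      · rw [Astep a b p rest hA hB, Bstep a b p rest hA hB]
        rw [ih b a (fun q hq => ((h q (List.mem_cons_of_mem p hq)).symm))]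

-- ===== VERDICT (by name: the statement is the Claim_ definition above) =====
theorem f_spec : Claim_equal_f := by
  unfold Claim_equal_f
  intro a b _
  unfold Spec_f
  rw [fEqAbody, fAltEqBbody]
  exact mainLemma (fPos a b) a b (fun p hp => memPosDisj a b p hp)
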